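-- pv_equiv track=rewrite | github.com/marchiesa/proof-lifting | smt_analysis/inline_lemmas.py | parse_call_args
-- ===== SOURCE A (Python) =====
-- def parse_call_args(args_text: str) -> list[str]:
--     """Parse comma-separated arguments, respecting nested parens/brackets."""
--     args = []
--     depth = 0
--     current = ""
--     for ch in args_text:
--         if ch in "([{":
--             depth += 1
--             current += ch
--         elif ch in ")]}":
--             depth -= 1
--             current += ch
--         elif ch == "," and depth == 0:
--             args.append(current.strip())
--             current = ""
--         else:
--             current += ch
--     if current.strip():
--         args.append(current.strip())
--     return args
-- ===== SOURCE B (Python) =====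
-- def parse_call_args(args_text: str) -> list[str]:
--     """Boundary-slicing split: record top-level comma positions while scanning,
--     take each argument as a slice of the original text, then drop a trailing
--     empty segment (the N-commas -> N+1-segments rule)."""
--     depth = 0
--     start = 0
--     segs = []
--     for i, ch in enumerate(args_text):
--         if ch in "([{":
--             depth += 1
--         elif ch in ")]}":
--             depth -= 1
--         elif ch == "," and depth == 0:
--             segs.append(args_text[start:i].strip())
--             start = i + 1
--     segs.append(args_text[start:].strip())
--     return segs[:-1] if segs[-1] == "" else segs
-- ===== Notes on version B (the rewrite author's own statement) =====
-- stated objective: alternative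
-- what changed: B does not accumulate a character buffer: it records top-level comma boundary indices while scanning and takes each argument as a stripped slice of the original text, appending the final slice unconditionally and dropping it only if empty, instead of A's per-branch buffer appends and conditional final append.
import Mathlib
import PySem

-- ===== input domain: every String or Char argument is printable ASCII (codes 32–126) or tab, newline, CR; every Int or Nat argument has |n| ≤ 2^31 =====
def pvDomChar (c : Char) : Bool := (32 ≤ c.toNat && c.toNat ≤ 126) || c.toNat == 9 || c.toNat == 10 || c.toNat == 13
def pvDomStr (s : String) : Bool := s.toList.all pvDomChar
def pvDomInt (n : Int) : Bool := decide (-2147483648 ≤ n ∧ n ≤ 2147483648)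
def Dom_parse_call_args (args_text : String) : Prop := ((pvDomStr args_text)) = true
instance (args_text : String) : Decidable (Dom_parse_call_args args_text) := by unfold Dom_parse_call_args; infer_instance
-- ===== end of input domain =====

-- B replaces A's character-accumulating buffer by recording top-level comma boundaries and
-- slicing the original text (same values, different decomposition; no speed claim).

-- ===== PORT A =====
-- loop body of A: state (args, depth, current)
def pvStepA (st : List String × Int × List Char) (ch : Char) : List String × Int × List Char :=
  if ch = '(' ∨ ch = '[' ∨ ch = '{' then (st.1, st.2.1 + 1, st.2.2 ++ [ch])
  else if ch = ')' ∨ ch = ']' ∨ ch = '}' then (st.1, st.2.1 - 1, st.2.2 ++ [ch])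
  else if ch = ',' ∧ st.2.1 = 0 then (st.1 ++ [String.ofList (PySem.Chars.strip st.2.2)], st.2.1, [])
  else (st.1, st.2.1, st.2.2 ++ [ch])

-- A's tail: `if current.strip(): args.append(current.strip())`
def pvFinishA (st : List String × Int × List Char) : List String :=
  if PySem.Chars.strip st.2.2 ≠ [] then st.1 ++ [String.ofList (PySem.Chars.strip st.2.2)] else st.1

def parse_call_args (args_text : String) : List String :=
  pvFinishA (args_text.toList.foldl pvStepA ([], 0, []))

-- ===== PORT B =====
-- loop body of B: state (segs, start, depth), input (i, ch) from enumerate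
def pvStepB (cs : List Char) (st : List String × Int × Int) (ic : Int × Char) :
    List String × Int × Int :=
  if ic.2 = '(' ∨ ic.2 = '[' ∨ ic.2 = '{' then (st.1, st.2.1, st.2.2 + 1)
  else if ic.2 = ')' ∨ ic.2 = ']' ∨ ic.2 = '}' then (st.1, st.2.1, st.2.2 - 1)
  else if ic.2 = ',' ∧ st.2.2 = 0 then
    (st.1 ++ [String.ofList (PySem.Chars.strip (PySem.List.slice cs (some st.2.1) (some ic.1)))],
     ic.1 + 1, st.2.2)
  else (st.1, st.2.1, st.2.2)

-- B's tail: `segs.append(args_text[start:].strip())`, then `segs[:-1] if segs[-1] == "" else segs`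
def pvFinishB (cs : List Char) (st : List String × Int × Int) : List String :=
  let segs2 := st.1 ++ [String.ofList (PySem.Chars.strip (PySem.List.slice cs (some st.2.1) none))]
  if PySem.List.pyGet? segs2 (-1) = some "" then PySem.List.slice segs2 none (some (-1))
  else segs2

def parse_call_args_alt (args_text : String) : List String :=
  let cs := args_text.toList
  pvFinishB cs ((PySem.List.enumerate cs).foldl (pvStepB cs) ([], 0, 0))

-- ===== PRECONDITION & SPEC =====
def Spec_parse_call_args (args_text : String) (out : List String) : Prop := out = parse_call_args_alt args_text
instance (args_text : String) (out : List String) : Decidable (Spec_parse_call_args args_text out) := by unfold Spec_parse_call_args; infer_instance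

-- ===== CLAIM (what is proved, stated in full; the proofs are below) =====
def Claim_equal_parse_call_args : Prop := ∀ (args_text : String), Dom_parse_call_args args_text → Spec_parse_call_args args_text (parse_call_args args_text)

-- ===== LEMMAS AND PROOFS =====

lemma pvGetNegOne {α : Type} (l : List α) (x : α) :
    PySem.List.pyGet? (l ++ [x]) (-1) = some x := by
  simp [PySem.List.pyGet?, PySem.List.pyIdx?]

-- A's buffer after reading cs[start:pos+1] is the slice it would have been, extended by cs[pos]
lemma pvTakeSnoc (cs : List Char) (start pos : Nat) (c : Char) (t : List Char)
    (hsp : start ≤ pos) (hd : cs.drop pos = c :: t) :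
    (cs.drop start).take (pos - start) ++ [c] = (cs.drop start).take (pos + 1 - start) := by
  have hidx : (cs.drop start)[pos - start]? = some c := by
    rw [List.getElem?_drop]
    have h1 : start + (pos - start) = pos := by omega
    rw [h1]
    have := congrArg (·[0]?) hd
    simpa [List.getElem?_drop] using this
  have h2 : pos + 1 - start = (pos - start) + 1 := by omega
  rw [h2, List.take_add_one, hidx]
  simp

-- invariant: A run on the remaining tail with buffer = cs[start:pos] agrees with B run on
-- the same tail enumerated from pos with boundary start
lemma pvMain (cs : List Char) (tail : List Char) :
    ∀ (pos start : Nat) (segs : List String) (depth : Int),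
      start ≤ pos → cs.drop pos = tail →
      pvFinishA (tail.foldl pvStepA (segs, depth, (cs.drop start).take (pos - start)))
        = pvFinishB cs ((PySem.List.enumerate tail (pos : Int)).foldl (pvStepB cs)
            (segs, (start : Int), depth)) := by
  induction tail with
  | nil =>
    intro pos start segs depth hsp hd
    have hlen : cs.length ≤ pos := by
      by_contra h
      have hne : cs.drop pos ≠ [] := by
        simp only [ne_eq, List.drop_eq_nil_iff]
        omega
      exact hne hd
    have htake : (cs.drop start).take (pos - start) = cs.drop start := by
      apply List.take_of_length_le
      simp only [List.length_drop]
      omega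
    simp only [List.foldl_nil, PySem.List.enumerate]
    rw [htake]
    unfold pvFinishA pvFinishB
    dsimp only
    rw [PySem.List.slice_from_natCast, pvGetNegOne, PySem.List.slice_to_neg_one,
      List.dropLast_concat]
    by_cases h : PySem.Chars.strip (cs.drop start) = []
    · rw [if_neg (by simpa using h), if_pos (by rw [h])]
    · rw [if_pos (by simpa using h), if_neg]
      intro he
      apply h
      have := congrArg String.toList (Option.some.inj he)
      simpa using this
  | cons c t ih =>
    intro pos start segs depth hsp hd
    have hdt : cs.drop (pos + 1) = t := by
      have h := congrArg List.tail hd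
      rwa [List.tail_drop] at h
    have hsnoc := pvTakeSnoc cs start pos c t hsp hd
    have hcast : ((pos : Int) + 1) = ((pos + 1 : Nat) : Int) := by push_cast; ring
    rw [PySem.List.enumerate_cons, List.foldl_cons, List.foldl_cons]
    unfold pvStepA pvStepB
    dsimp only
    by_cases h1 : c = '(' ∨ c = '[' ∨ c = '{'
    · rw [if_pos h1, if_pos h1, hsnoc, hcast]
      exact ih (pos + 1) start segs (depth + 1) (by omega) hdt
    · rw [if_neg h1, if_neg h1]
      by_cases h2 : c = ')' ∨ c = ']' ∨ c = '}'
      · rw [if_pos h2, if_pos h2, hsnoc, hcast]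
        exact ih (pos + 1) start segs (depth - 1) (by omega) hdt
      · rw [if_neg h2, if_neg h2]
        by_cases h3 : c = ',' ∧ depth = 0
        · rw [if_pos h3, if_pos h3, PySem.List.slice_natCast, hcast]
          have := ih (pos + 1) (pos + 1)
            (segs ++ [String.ofList (PySem.Chars.strip ((cs.drop start).take (pos - start)))])
            depth (le_refl _) hdt
          simpa using this
        · rw [if_neg h3, if_neg h3, hsnoc, hcast]
          exact ih (pos + 1) start segs depth (by omega) hdt

-- ===== VERDICT (by name: the statement is the Claim_ definition above) =====
theorem parse_call_args_spec : Claim_equal_parse_call_args := by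
  intro s _
  unfold Spec_parse_call_args parse_call_args parse_call_args_alt
  have := pvMain s.toList s.toList 0 0 [] 0 (le_refl 0) (by simp)
  simpa using this
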